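-- pv_equiv track=rewrite | github.com/MrLinna/Ristinolla | ristinolla2.py | nousu
-- ===== SOURCE A (Python) =====
-- def nousu(summa, i,j, mat):
--    #alalaitaan
--    koko = len(mat)-1
--
--    while(True):
--       if(j == 0 or i == koko):
--          break
--       if(mat[i][j]==mat[i+1][j-1]):
--          j = j-1
--          i = i+1
--       else:
--          break
--    # lasketaan palikat
--    pal = [[i,j]]
--    while(True):
--       if(j == koko or i ==0):
--          break
--       if(mat[i][j]==mat[i-1][j+1]):
--          j = j+1
--          i = i-1
--          summa = summa + 1
--          pal.append([i,j])
--       else: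
--          break
--    return summa, pal
-- ===== SOURCE B (Python) =====
-- def nousu(summa, i, j, mat):
--     # Different decomposition: materialise the whole anti-diagonal as an
--     # index list once, then do two index scans over the value list.
--     koko = len(mat) - 1
--     s = i + j
--     rhi = min(koko, s)
--     rlo = max(0, s - koko)
--     rows = list(range(rhi, rlo - 1, -1))      # bottom-left end first
--     vals = [mat[r][s - r] for r in rows]
--     a = rows.index(i)
--     while a > 0 and vals[a - 1] == vals[a]:
--         a -= 1
--     e = a
--     while e + 1 < len(vals) and vals[e + 1] == vals[e]:
--         e += 1
--     pal = [[r, s - r] for r in rows[a:e + 1]]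
--     return summa + (e - a), pal
-- ===== Notes on version B (the rewrite author's own statement) =====
-- stated objective: alternative
-- what changed: A walks the matrix cell-by-cell with two coordinate while-loops; B materialises the whole anti-diagonal once as an explicit index list plus a value list, locates (i,j) by list index, and finds the run with two index scans over that list, producing pal by mapping a slice.
-- outside the precondition, e.g. on nousu(0, -1, 1, [[1, 2], [3, 4]]): A returns (0, [[-1, 1]]), B raises ValueError; on nousu(0, 1, 1, [[1], [2]]): A returns (0, [[1, 1]]), B raises IndexError
import Mathlib
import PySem

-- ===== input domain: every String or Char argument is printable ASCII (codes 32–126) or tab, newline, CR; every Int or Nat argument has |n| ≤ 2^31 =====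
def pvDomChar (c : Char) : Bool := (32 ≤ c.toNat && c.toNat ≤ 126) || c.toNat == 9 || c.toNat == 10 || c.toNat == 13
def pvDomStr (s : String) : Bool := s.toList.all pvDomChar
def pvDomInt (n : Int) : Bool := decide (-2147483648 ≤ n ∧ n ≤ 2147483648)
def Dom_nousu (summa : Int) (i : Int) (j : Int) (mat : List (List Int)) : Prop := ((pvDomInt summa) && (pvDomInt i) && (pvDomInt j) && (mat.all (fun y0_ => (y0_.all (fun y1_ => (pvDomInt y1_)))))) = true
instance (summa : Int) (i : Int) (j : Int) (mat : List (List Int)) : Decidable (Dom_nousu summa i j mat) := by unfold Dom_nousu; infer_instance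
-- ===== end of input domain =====

-- B replaces A's two coordinate walks over the matrix by materialising the
-- anti-diagonal once as an index list and doing two index scans over the value
-- list (objective: alternative decomposition, same cost).

-- mat[i][j] (Python semantics; none = IndexError)
def pvMatGet (mat : List (List Int)) (i j : Int) : Option Int :=
  (PySem.List.pyGet? mat i).bind (fun row => PySem.List.pyGet? row j)

-- ===== PORT A =====
-- first while loop: walk towards the bottom-left end while cells stay equal
def nousuDown (mat : List (List Int)) (koko : Int) : Nat → Int → Int → Int × Int
  | 0, i, j => (i, j)
  | f + 1, i, j =>
    if j = 0 ∨ i = koko then (i, j)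
    else
      match pvMatGet mat i j, pvMatGet mat (i + 1) (j - 1) with
      | some a, some b => if a = b then nousuDown mat koko f (i + 1) (j - 1) else (i, j)
      | _, _ => (i, j)  -- Python raises here (outside Pre_)

-- second while loop: walk up, counting and collecting pal
def nousuUp (mat : List (List Int)) (koko : Int) :
    Nat → Int → Int → Int → List (List Int) → Int × List (List Int)
  | 0, _, _, summa, pal => (summa, pal)
  | f + 1, i, j, summa, pal =>
    if j = koko ∨ i = 0 then (summa, pal)
    else
      match pvMatGet mat i j, pvMatGet mat (i - 1) (j + 1) with
      | some a, some b =>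
        if a = b then nousuUp mat koko f (i - 1) (j + 1) (summa + 1) (pal ++ [[i - 1, j + 1]])
        else (summa, pal)
      | _, _ => (summa, pal)  -- Python raises here (outside Pre_)

-- fuel mat.length is enough on Pre_: each loop moves one diagonal step per iteration
def nousu (summa : Int) (i : Int) (j : Int) (mat : List (List Int)) : Int × List (List Int) :=
  let koko : Int := (mat.length : Int) - 1
  let p := nousuDown mat koko mat.length i j
  nousuUp mat koko mat.length p.1 p.2 summa [[p.1, p.2]]

-- ===== PORT B =====
-- while a > 0 and vals[a-1] == vals[a]: a -= 1   (structural on a)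
def scanDown (vals : List Int) : Nat → Nat
  | 0 => 0
  | a + 1 => if vals[a]? = vals[a + 1]? then scanDown vals a else a + 1

-- while e + 1 < len(vals) and vals[e+1] == vals[e]: e += 1   (fuel = len(vals) suffices)
def scanUp (vals : List Int) : Nat → Nat → Nat
  | 0, e => e
  | f + 1, e => if e + 1 < vals.length ∧ vals[e + 1]? = vals[e]? then scanUp vals f (e + 1) else e

def nousu_alt (summa : Int) (i : Int) (j : Int) (mat : List (List Int)) : Int × List (List Int) :=
  let koko : Int := (mat.length : Int) - 1
  let s := i + j
  let rhi := min koko s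
  let rlo := max 0 (s - koko)
  let rows := PySem.List.pyRange rhi (rlo - 1) (-1)
  let vals := rows.map (fun r => (pvMatGet mat r (s - r)).getD 0)  -- in range on Pre_
  let a := scanDown vals ((PySem.List.index? rows i).getD 0)       -- rows.index(i); Some on Pre_
  let e := scanUp vals vals.length a
  let pal := (PySem.List.slice rows (some (a : Int)) (some ((e : Int) + 1))).map (fun r => [r, s - r])
  (summa + ((e : Int) - (a : Int)), pal)

-- ===== PRECONDITION & SPEC =====
-- Pre_ restricts to the function's natural domain: a nonempty board, an
-- in-range cell (i, j), and every row met by the anti-diagonal through (i, j)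
-- long enough to hold its diagonal cell (exactly the cells both programs
-- read).  A also returns (via Python's negative-index wraparound) on some
-- out-of-range or too-ragged inputs; those are outside the natural domain and
-- excluded here.
def Pre_nousu (summa : Int) (i : Int) (j : Int) (mat : List (List Int)) : Prop :=
  mat ≠ [] ∧ 0 ≤ i ∧ i < (mat.length : Int) ∧ 0 ≤ j ∧ j < (mat.length : Int) ∧
    ∀ (k : Nat) (hk : k < mat.length),
      max 0 (i + j - ((mat.length : Int) - 1)) ≤ (k : Int) →
      (k : Int) ≤ min ((mat.length : Int) - 1) (i + j) →
      i + j - (k : Int) < ((mat[k]'hk).length : Int)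
instance (summa : Int) (i : Int) (j : Int) (mat : List (List Int)) : Decidable (Pre_nousu summa i j mat) := by
  unfold Pre_nousu; infer_instance

def pvWitness_nousu : Int × Int × Int × List (List Int) := (0, 1, 1, [[1, 2], [2, 1]])

def Spec_nousu (summa : Int) (i : Int) (j : Int) (mat : List (List Int)) (out : Int × List (List Int)) : Prop := out = nousu_alt summa i j mat
instance (summa : Int) (i : Int) (j : Int) (mat : List (List Int)) (out : Int × List (List Int)) : Decidable (Spec_nousu summa i j mat out) := by unfold Spec_nousu; infer_instance

-- ===== CLAIM (what is proved, stated in full; the proofs are below) =====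
def Claim_equal_nousu : Prop := ∀ (summa : Int) (i : Int) (j : Int) (mat : List (List Int)), Dom_nousu summa i j mat → Pre_nousu summa i j mat → Spec_nousu summa i j mat (nousu summa i j mat)

-- ===== LEMMAS AND PROOFS =====

theorem scanDown_le (vals : List Int) : ∀ a, scanDown vals a ≤ a := by
  intro a
  induction a with
  | zero => simp [scanDown]
  | succ a ih =>
    simp only [scanDown]
    split
    · omega
    · omega

theorem scanUp_ge (vals : List Int) : ∀ f e, e ≤ scanUp vals f e := by
  intro f
  induction f with
  | zero => intro e; simp [scanUp]
  | succ f ih =>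
    intro e
    simp only [scanUp]
    split
    · exact le_trans (by omega) (ih (e + 1))
    · exact le_rfl

theorem scanUp_lt (vals : List Int) : ∀ f e, e < vals.length → scanUp vals f e < vals.length := by
  intro f
  induction f with
  | zero => intro e he; simpa [scanUp] using he
  | succ f ih =>
    intro e he
    simp only [scanUp]
    split
    · exact ih (e + 1) (by omega)
    · exact he

theorem scanUp_fuel (vals : List Int) :
    ∀ f f' e, vals.length ≤ e + f + 1 → vals.length ≤ e + f' + 1 →
      scanUp vals f e = scanUp vals f' e := by
  intro f
  induction f with
  | zero =>
    intro f' e h1 h2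
    cases f' with
    | zero => rfl
    | succ f' =>
      simp only [scanUp]
      rw [if_neg]
      rintro ⟨hlt, -⟩
      omega
  | succ f ih =>
    intro f' e h1 h2
    cases f' with
    | zero =>
      simp only [scanUp]
      rw [if_neg]
      rintro ⟨hlt, -⟩
      omega
    | succ f' =>
      simp only [scanUp]
      split
      · exact ih f' (e + 1) (by omega) (by omega)
      · rfl

theorem index?_map_range_sub (rhi : Int) (L k : Nat) (hk : k < L) :
    PySem.List.index? ((List.range L).map (fun (t : Nat) => rhi - (t : Int))) (rhi - (k : Int)) = some k := by
  induction k generalizing rhi L with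
  | zero =>
    obtain ⟨m, rfl⟩ : ∃ m, L = m + 1 := ⟨L - 1, by omega⟩
    rw [List.range_succ_eq_map, List.map_cons]
    simp only [Nat.cast_zero, sub_zero]
    apply PySem.List.index?_cons_self
  | succ k ih =>
    obtain ⟨m, rfl⟩ : ∃ m, L = m + 1 := ⟨L - 1, by omega⟩
    rw [List.range_succ_eq_map, List.map_cons, List.map_map]
    simp only [Nat.cast_zero, sub_zero]
    rw [PySem.List.index?_cons_of_ne _ (by push_cast; omega)]
    have heq : (List.range m).map ((fun (t : Nat) => rhi - (t : Int)) ∘ Nat.succ) =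
        (List.range m).map (fun (t : Nat) => (rhi - 1) - (t : Int)) := by
      apply List.map_congr_left
      intro t _
      simp only [Function.comp_apply]
      push_cast
      ring
    have hv : rhi - ((k : Int) + 1) = (rhi - 1) - (k : Int) := by ring
    push_cast
    rw [heq, hv, ih (rhi - 1) m (by omega)]
    rfl

theorem nousuDown_stop (mat : List (List Int)) (koko : Int) (f : Nat) (i j : Int)
    (h : j = 0 ∨ i = koko) : nousuDown mat koko f i j = (i, j) := by
  cases f with
  | zero => rfl
  | succ f => simp only [nousuDown]; rw [if_pos h]

theorem nousuDown_step (mat : List (List Int)) (koko : Int) (f : Nat) (i j : Int)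
    (h : ¬(j = 0 ∨ i = koko)) (x y : Int)
    (h1 : pvMatGet mat i j = some x) (h2 : pvMatGet mat (i + 1) (j - 1) = some y) :
    nousuDown mat koko (f + 1) i j =
      if x = y then nousuDown mat koko f (i + 1) (j - 1) else (i, j) := by
  simp only [nousuDown]
  rw [if_neg h, h1, h2]

theorem nousuUp_stop (mat : List (List Int)) (koko : Int) (f : Nat) (i j summa : Int)
    (pal : List (List Int)) (h : j = koko ∨ i = 0) :
    nousuUp mat koko f i j summa pal = (summa, pal) := by
  cases f with
  | zero => rfl
  | succ f => simp only [nousuUp]; rw [if_pos h]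

theorem nousuUp_step (mat : List (List Int)) (koko : Int) (f : Nat) (i j summa : Int)
    (pal : List (List Int)) (h : ¬(j = koko ∨ i = 0)) (x y : Int)
    (h1 : pvMatGet mat i j = some x) (h2 : pvMatGet mat (i - 1) (j + 1) = some y) :
    nousuUp mat koko (f + 1) i j summa pal =
      if x = y then nousuUp mat koko f (i - 1) (j + 1) (summa + 1) (pal ++ [[i - 1, j + 1]])
      else (summa, pal) := by
  simp only [nousuUp]
  rw [if_neg h, h1, h2]

theorem down_lockstep (mat : List (List Int)) (koko s rhi rlo : Int) (g : Int → Int)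
    (vals : List Int)
    (hrhi : rhi = min koko s) (hrlo : rlo = max 0 (s - koko))
    (hvals : ∀ k : Nat, (k : Int) ≤ rhi - rlo → vals[k]? = some (g (rhi - k)))
    (hget : ∀ r : Int, rlo ≤ r → r ≤ rhi → pvMatGet mat r (s - r) = some (g r)) :
    ∀ (a : Nat) (f : Nat), a < f → (a : Int) ≤ rhi - rlo →
      nousuDown mat koko f (rhi - a) (s - (rhi - a)) =
        (rhi - (scanDown vals a : Int), s - (rhi - (scanDown vals a : Int))) := by
  intro a
  induction a with
  | zero =>
    intro f hf _
    rw [nousuDown_stop mat koko f _ _ (by push_cast; omega)]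
    simp [scanDown]
  | succ a ih =>
    intro f hf hle
    obtain ⟨f', rfl⟩ : ∃ f', f = f' + 1 := ⟨f - 1, by omega⟩
    have hle' : (a : Int) + 1 ≤ rhi - rlo := by push_cast at hle; omega
    push_cast
    have h1 : pvMatGet mat (rhi - ((a : Int) + 1)) (s - (rhi - ((a : Int) + 1))) =
        some (g (rhi - ((a : Int) + 1))) := by
      have := hget (rhi - ((a : Int) + 1)) (by omega) (by omega)
      rwa [show s - (rhi - ((a:Int)+1)) = s - (rhi - ((a:Int)+1)) from rfl] at this
    have h2 : pvMatGet mat (rhi - ((a : Int) + 1) + 1) (s - (rhi - ((a : Int) + 1)) - 1) =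
        some (g (rhi - (a : Int))) := by
      have := hget (rhi - (a : Int)) (by omega) (by omega)
      rw [show rhi - ((a:Int)+1) + 1 = rhi - (a:Int) by ring,
          show s - (rhi - ((a:Int)+1)) - 1 = s - (rhi - (a:Int)) by ring]
      exact this
    rw [nousuDown_step mat koko f' _ _ (by omega) _ _ h1 h2]
    have hva : vals[a]? = some (g (rhi - (a : Int))) := hvals a (by omega)
    have hva1 : vals[a + 1]? = some (g (rhi - ((a : Int) + 1))) := by
      have := hvals (a + 1) (by push_cast; omega)
      push_cast at this
      exact this
    by_cases hEq : g (rhi - ((a : Int) + 1)) = g (rhi - (a : Int))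
    · rw [if_pos hEq]
      have hsd : scanDown vals (a + 1) = scanDown vals a := by
        simp only [scanDown]
        rw [if_pos (by rw [hva, hva1]; exact congrArg some hEq.symm)]
      rw [hsd,
          show rhi - ((a:Int)+1) + 1 = rhi - (a:Int) by ring,
          show s - (rhi - ((a:Int)+1)) - 1 = s - (rhi - (a:Int)) by ring]
      exact ih f' (by omega) (by omega)
    · rw [if_neg hEq]
      have hsd : scanDown vals (a + 1) = a + 1 := by
        simp only [scanDown]
        rw [if_neg]
        rw [hva, hva1]
        intro hcon
        exact hEq (Option.some.inj hcon).symm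
      rw [hsd]
      push_cast
      rfl

theorem up_lockstep (mat : List (List Int)) (koko s rhi rlo : Int) (g : Int → Int)
    (vals : List Int)
    (hrhi : rhi = min koko s) (hrlo : rlo = max 0 (s - koko))
    (hlen : vals.length = (rhi - rlo + 1).toNat)
    (hvals : ∀ k : Nat, (k : Int) ≤ rhi - rlo → vals[k]? = some (g (rhi - k)))
    (hget : ∀ r : Int, rlo ≤ r → r ≤ rhi → pvMatGet mat r (s - r) = some (g r)) :
    ∀ (f : Nat) (k : Nat) (summa : Int) (pal : List (List Int)),
      (k : Int) ≤ rhi - rlo →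
      nousuUp mat koko f (rhi - k) (s - (rhi - k)) summa pal =
        (summa + ((scanUp vals f k : Int) - (k : Int)),
          pal ++ (List.range' (k + 1) (scanUp vals f k - k)).map
            (fun (t : Nat) => [rhi - (t : Int), s - (rhi - (t : Int))])) := by
  intro f
  induction f with
  | zero =>
    intro k summa pal _
    simp [nousuUp, scanUp]
  | succ f ih =>
    intro k summa pal hk
    by_cases hend : (k : Int) = rhi - rlo
    · rw [nousuUp_stop mat koko (f + 1) _ _ _ _ (by omega)]
      have hsu : scanUp vals (f + 1) k = k := by
        simp only [scanUp]
        rw [if_neg]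
        rintro ⟨hlt, -⟩
        omega
      rw [hsu]
      simp
    · have hklt : (k : Int) < rhi - rlo := lt_of_le_of_ne hk hend
      have h1 : pvMatGet mat (rhi - (k : Int)) (s - (rhi - (k : Int))) =
          some (g (rhi - (k : Int))) := hget _ (by omega) (by omega)
      have h2 : pvMatGet mat (rhi - (k : Int) - 1) (s - (rhi - (k : Int)) + 1) =
          some (g (rhi - ((k : Int) + 1))) := by
        have h := hget (rhi - ((k : Int) + 1)) (by omega) (by omega)
        rw [show s - (rhi - ((k:Int)+1)) = s - (rhi - (k:Int)) + 1 by ring] at h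
        rw [show rhi - (k:Int) - 1 = rhi - ((k:Int)+1) by ring]
        exact h
      rw [nousuUp_step mat koko f _ _ _ _ (by omega) _ _ h1 h2]
      have hva : vals[k]? = some (g (rhi - (k : Int))) := hvals k (by omega)
      have hva1 : vals[k + 1]? = some (g (rhi - ((k : Int) + 1))) := by
        have := hvals (k + 1) (by push_cast; omega)
        push_cast at this
        exact this
      have hlt : k + 1 < vals.length := by omega
      by_cases hEq : g (rhi - (k : Int)) = g (rhi - ((k : Int) + 1))
      · rw [if_pos hEq]
        have hsu : scanUp vals (f + 1) k = scanUp vals f (k + 1) := by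
          simp only [scanUp]
          rw [if_pos ⟨hlt, by rw [hva, hva1]; exact congrArg some hEq.symm⟩]
        have hrw1 : rhi - (k : Int) - 1 = rhi - ((k + 1 : Nat) : Int) := by push_cast; ring
        have hrw2 : s - (rhi - (k : Int)) + 1 = s - (rhi - ((k + 1 : Nat) : Int)) := by push_cast; ring
        rw [hrw1, hrw2, ih (k + 1) (summa + 1) (pal ++ [[rhi - ((k + 1 : Nat) : Int), s - (rhi - ((k + 1 : Nat) : Int))]]) (by push_cast; omega)]
        have hge : k + 1 ≤ scanUp vals f (k + 1) := scanUp_ge vals f (k + 1)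
        rw [hsu]
        simp only [Prod.mk.injEq]
        refine ⟨by push_cast; omega, ?_⟩
        rw [List.append_assoc]
        congr 1
        have hsplit : scanUp vals f (k + 1) - k = (scanUp vals f (k + 1) - (k + 1)) + 1 := by omega
        rw [hsplit, List.range'_succ]
        push_cast
        simp
      · rw [if_neg hEq]
        have hsu : scanUp vals (f + 1) k = k := by
          simp only [scanUp]
          rw [if_neg]
          rintro ⟨-, hcon⟩
          rw [hva, hva1] at hcon
          exact hEq (Option.some.inj hcon).symm
        rw [hsu]
        simp

theorem take_range'_of_le : ∀ (m s n : Nat), m ≤ n → List.take m (List.range' s n) = List.range' s m := by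
  intro m
  induction m with
  | zero => intro s n _; simp
  | succ m ih =>
    intro s n h
    obtain ⟨n', rfl⟩ : ∃ n', n = n' + 1 := ⟨n - 1, by omega⟩
    rw [List.range'_succ, List.range'_succ, List.take_succ_cons, ih (s + 1) n' (by omega)]

-- ===== VERDICT (by name: the statement is the Claim_ definition above) =====
theorem nousu_spec : Claim_equal_nousu := by
  unfold Claim_equal_nousu
  intro summa i j mat hdom hpre
  obtain ⟨hne, hi0, hi1, hj0, hj1, hdiag⟩ := hpre
  unfold Spec_nousu
  have hn1 : 0 < mat.length := List.length_pos_of_ne_nil hne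
  simp only [nousu, nousu_alt]
  set koko : Int := (mat.length : Int) - 1 with hkoko
  set s : Int := i + j with hs
  set rhi : Int := min koko s with hrhi
  set rlo : Int := max 0 (s - koko) with hrlo
  set rows : List Int := PySem.List.pyRange rhi (rlo - 1) (-1) with hrows_def
  set g : Int → Int := fun r => (pvMatGet mat r (s - r)).getD 0 with hg
  set vals : List Int := rows.map g with hvals_def
  set L : Nat := (rhi - rlo + 1).toNat with hL
  have hrows : rows = (List.range L).map (fun (t : Nat) => rhi - (t : Int)) := by
    rw [hrows_def, PySem.List.pyRange_neg_one, show rhi - (rlo - 1) = rhi - rlo + 1 by ring, hL]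
  have hget : ∀ r : Int, rlo ≤ r → r ≤ rhi → pvMatGet mat r (s - r) = some (g r) := by
    intro r h1 h2
    have hr0 : 0 ≤ r := by omega
    have hrn : r < (mat.length : Int) := by omega
    have hrnn : r.toNat < mat.length := by omega
    have hrow := PySem.List.pyGet?_eq_some_getElem mat hr0 hrn
    have hc0 : 0 ≤ s - r := by omega
    have hdr := hdiag r.toNat hrnn (by omega) (by omega)
    have hcn : s - r < ((mat[r.toNat]'hrnn).length : Int) :=
      calc s - r = i + j - ((r.toNat : Nat) : Int) := by omega
        _ < _ := hdr
    have hcell := PySem.List.pyGet?_eq_some_getElem (mat[r.toNat]'hrnn) hc0 hcn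
    simp [pvMatGet, hg, hrow, hcell]
  have hlen : vals.length = (rhi - rlo + 1).toNat := by
    simp [hvals_def, hrows, hL]
  have hvals : ∀ k : Nat, (k : Int) ≤ rhi - rlo → vals[k]? = some (g (rhi - (k : Int))) := by
    intro k hk
    have hkL : k < L := by omega
    rw [hvals_def, hrows, List.map_map, List.getElem?_map, List.getElem?_range hkL]
    rfl
  set a0 : Nat := (rhi - i).toNat with ha0
  have hidx : PySem.List.index? rows i = some a0 := by
    rw [hrows, show i = rhi - ((a0 : Nat) : Int) by omega]
    exact index?_map_range_sub rhi L a0 (by omega)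
  have hdown : nousuDown mat koko mat.length i j =
      (rhi - (scanDown vals a0 : Int), s - (rhi - (scanDown vals a0 : Int))) := by
    have h := down_lockstep mat koko s rhi rlo g vals hrhi hrlo hvals hget a0 mat.length
      (by omega) (by omega)
    rw [show rhi - ((a0 : Nat) : Int) = i by omega] at h
    rw [show s - i = j by omega] at h
    exact h
  set a' : Nat := scanDown vals a0 with ha'
  have ha'le : a' ≤ a0 := scanDown_le vals a0
  have hup := up_lockstep mat koko s rhi rlo g vals hrhi hrlo hlen hvals hget mat.length a'
    summa [[rhi - (a' : Int), s - (rhi - (a' : Int))]] (by omega)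
  have hfuel : scanUp vals mat.length a' = scanUp vals vals.length a' :=
    scanUp_fuel vals mat.length vals.length a' (by omega) (by omega)
  rw [hidx, hdown]
  simp only [Option.getD_some]
  rw [hup, hfuel]
  set e : Nat := scanUp vals vals.length a' with he
  have hee : a' ≤ e := by rw [he]; exact scanUp_ge vals vals.length a'
  have heL : e < L := by
    rw [he]
    have := scanUp_lt vals vals.length a' (by omega)
    omega
  simp only [Prod.mk.injEq]
  constructor
  · rfl
  · rw [show (e : Int) + 1 = ((e + 1 : Nat) : Int) by push_cast; ring]
    rw [PySem.List.slice_natCast, hrows]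
    rw [← List.map_drop, ← List.map_take]
    rw [List.range_eq_range', List.drop_range']
    rw [take_range'_of_le (e + 1 - a') (0 + a' * 1) (L - a') (by omega)]
    rw [show e + 1 - a' = (e - a') + 1 by omega, List.range'_succ]
    simp only [List.map_cons, List.map_map]
    rw [List.singleton_append]
    congr 1
    · simp
    · rw [show 0 + a' * 1 + 1 = a' + 1 by omega]
      rfl
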